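-- pv_equiv track=rewrite | github.com/veluga29/CodingTest | [온라인 저지] 실전 문제/우테코 연습 문제/problem 2 - Implementation.py | solution
-- ===== SOURCE A (Python) =====
-- def solution(word):
--     result = ""
--
--     # 단어를 한 글자 씩 처리
--     for w in word:
--         if w.isupper():  # 글자가 대문자일 경우
--             result += chr((ord('Z') - (ord(w) - ord('A'))))  # 아스키 코드로 변환 계산해 문자열에 추가
--         elif w.islower():  # 글자가 소문자일 경우
--             result += chr((ord('z') - (ord(w) - ord('a'))))
--         else:  # 알파벳 이외의 글자(공백)일 경우
--             result += w  # 문자열 그냥 추가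
--
--     return result
-- ===== SOURCE B (Python) =====
-- _UP = "ABCDEFGHIJKLMNOPQRSTUVWXYZ"
-- _LO = "abcdefghijklmnopqrstuvwxyz"
-- _TABLE = str.maketrans(_UP + _LO, _UP[::-1] + _LO[::-1])
--
--
-- def solution(word):
--     return word.translate(_TABLE)
-- ===== Notes on version B (the rewrite author's own statement) =====
-- stated objective: idiomatic
-- what changed: Replaces the per-character branchy loop with ASCII arithmetic and string concatenation by a fixed 52-entry translation table built once with str.maketrans and a single word.translate call.
import Mathlib
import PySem

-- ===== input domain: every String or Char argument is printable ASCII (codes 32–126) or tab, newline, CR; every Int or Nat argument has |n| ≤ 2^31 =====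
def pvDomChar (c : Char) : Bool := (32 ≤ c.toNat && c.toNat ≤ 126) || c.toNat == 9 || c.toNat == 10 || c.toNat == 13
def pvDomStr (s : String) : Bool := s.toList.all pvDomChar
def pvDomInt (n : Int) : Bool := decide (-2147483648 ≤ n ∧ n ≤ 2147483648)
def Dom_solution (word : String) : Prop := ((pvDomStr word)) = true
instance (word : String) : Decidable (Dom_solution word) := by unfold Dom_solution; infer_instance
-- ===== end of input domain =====

-- B replaces A's branchy per-character loop by a prebuilt 52-entry translation table
-- (str.maketrans / translate); chars not in the table pass through unchanged.

-- ===== PORT A =====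
-- w.isupper()/w.islower() on a single char are ported as the ASCII range tests;
-- this is exact on the printable-ASCII domain Dom_solution.
def solution (word : String) : String :=
  String.mk (word.toList.foldl (fun result w =>
    if 65 ≤ w.toNat ∧ w.toNat ≤ 90 then
      result ++ [Char.ofNat (90 - (w.toNat - 65))]
    else if 97 ≤ w.toNat ∧ w.toNat ≤ 122 then
      result ++ [Char.ofNat (122 - (w.toNat - 97))]
    else
      result ++ [w]) [])

-- ===== PORT B =====
-- the translation table built once from the two alphabets and their reverses
def pvUp : List Char := "ABCDEFGHIJKLMNOPQRSTUVWXYZ".toList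
def pvLo : List Char := "abcdefghijklmnopqrstuvwxyz".toList
def pvTable : PySem.Dict Char Char :=
  PySem.Dict.ofList (List.zip (pvUp ++ pvLo) (pvUp.reverse ++ pvLo.reverse))
-- word.translate(table): each char is looked up in the table, missing chars unchanged
def solution_alt (word : String) : String :=
  String.mk (word.toList.map (fun c => pvTable.getD c c))

-- ===== PRECONDITION & SPEC =====
def Spec_solution (word : String) (out : String) : Prop := out = solution_alt word
instance (word : String) (out : String) : Decidable (Spec_solution word out) := by unfold Spec_solution; infer_instance

-- ===== CLAIM (what is proved, stated in full; the proofs are below) =====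
def Claim_equal_solution : Prop := ∀ (word : String), Dom_solution word → Spec_solution word (solution word)

-- ===== LEMMAS AND PROOFS =====

-- A's per-character step
def pvStepA (w : Char) : Char :=
  if 65 ≤ w.toNat ∧ w.toNat ≤ 90 then Char.ofNat (90 - (w.toNat - 65))
  else if 97 ≤ w.toNat ∧ w.toNat ≤ 122 then Char.ofNat (122 - (w.toNat - 97))
  else w

set_option maxRecDepth 4096 in
theorem pvStep_eq_table_lt128 : ∀ n : Fin 128,
    pvStepA (Char.ofNat n.val) = pvTable.getD (Char.ofNat n.val) (Char.ofNat n.val) := by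
  decide

theorem pvStepLambda :
    (fun (result : List Char) (w : Char) =>
      if 65 ≤ w.toNat ∧ w.toNat ≤ 90 then result ++ [Char.ofNat (90 - (w.toNat - 65))]
      else if 97 ≤ w.toNat ∧ w.toNat ≤ 122 then result ++ [Char.ofNat (122 - (w.toNat - 97))]
      else result ++ [w]) = fun result w => result ++ [pvStepA w] := by
  funext r w
  unfold pvStepA
  split_ifs <;> rfl

theorem pvStep_eq_table (c : Char) (h : pvDomChar c = true) :
    pvStepA c = pvTable.getD c c := by
  have hlt : c.toNat < 128 := by
    simp [pvDomChar] at h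
    omega
  have hofNat : Char.ofNat c.toNat = c := Char.ofNat_toNat c
  have := pvStep_eq_table_lt128 ⟨c.toNat, hlt⟩
  simpa [hofNat] using this

theorem pvFoldl_eq_map (l : List Char) (acc : List Char) :
    l.foldl (fun result w => result ++ [pvStepA w]) acc = acc ++ l.map pvStepA := by
  induction l generalizing acc with
  | nil => simp
  | cons x xs ih => simp [ih]

-- ===== VERDICT (by name: the statement is the Claim_ definition above) =====
theorem solution_spec : Claim_equal_solution := by
  intro word hdom
  unfold Spec_solution solution solution_alt
  have hall : ∀ c ∈ word.toList, pvDomChar c = true := by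
    simpa [Dom_solution, pvDomStr, List.all_eq_true] using hdom
  have hA : word.toList.foldl (fun result w =>
      if 65 ≤ w.toNat ∧ w.toNat ≤ 90 then result ++ [Char.ofNat (90 - (w.toNat - 65))]
      else if 97 ≤ w.toNat ∧ w.toNat ≤ 122 then result ++ [Char.ofNat (122 - (w.toNat - 97))]
      else result ++ [w]) [] = word.toList.map pvStepA := by
    rw [pvStepLambda, pvFoldl_eq_map]
    simp
  rw [hA]
  exact congrArg String.mk (List.map_congr_left (fun c hc => pvStep_eq_table c (hall c hc)))
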